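-- pv_equiv track=rewrite | github.com/ShuvalovAnthony/ege | 22/63071/63071.py | findMaxTime
-- ===== SOURCE A (Python) =====
-- def findMaxTime(data):
--     maxTime = 0
--     currentTime = 0
--     for time in range(200, 400):
--         procCounter = 0
--         for processId in data:
--             start, stop = data[processId][0], data[processId][1]
--             if (start <= time <= stop) and (processId != 8): procCounter += 1
--
--         if procCounter == 4: currentTime += 1
--         else:
--             maxTime = max(maxTime, currentTime)
--             currentTime = 0
--     return maxTime
-- ===== SOURCE B (Python) =====
-- def findMaxTime(data):
--     # difference array over the window [200, 400): one pass over the processes,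
--     # then one pass over the 200 time points (prefix sums + longest run of 4)
--     diff = [0] * 201
--     for processId, vals in data.items():
--         if processId == 8:
--             continue
--         start, stop = vals[0], vals[1]
--         lo = max(start, 200)
--         hi = min(stop, 399)
--         if lo <= hi:
--             diff[lo - 200] += 1
--             diff[hi - 199] -= 1
--     maxTime = 0
--     currentTime = 0
--     count = 0
--     for i in range(200):
--         count += diff[i]
--         if count == 4:
--             currentTime += 1
--         else:
--             maxTime = max(maxTime, currentTime)
--             currentTime = 0
--     return maxTime
-- ===== Notes on version B (the rewrite author's own statement) =====
-- stated objective: faster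
-- what changed: B replaces A's rescan of all processes at each of the 200 time points by a difference array built in one pass over the processes, then a single prefix-sum scan over the 200-point window for the longest run of count 4.
import Mathlib
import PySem

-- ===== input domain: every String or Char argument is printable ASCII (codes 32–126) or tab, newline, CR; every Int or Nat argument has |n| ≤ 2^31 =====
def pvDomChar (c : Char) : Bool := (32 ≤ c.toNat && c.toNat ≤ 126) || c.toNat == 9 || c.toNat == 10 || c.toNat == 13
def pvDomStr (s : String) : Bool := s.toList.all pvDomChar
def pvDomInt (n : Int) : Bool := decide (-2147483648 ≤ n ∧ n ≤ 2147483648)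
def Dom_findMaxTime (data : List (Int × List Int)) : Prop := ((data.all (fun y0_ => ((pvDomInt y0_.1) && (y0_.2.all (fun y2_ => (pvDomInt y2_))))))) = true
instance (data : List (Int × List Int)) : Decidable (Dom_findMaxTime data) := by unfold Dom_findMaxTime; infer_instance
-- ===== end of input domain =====

-- B replaces A's per-time rescan of all processes (200·N condition tests) by a difference
-- array built in one pass over the processes plus one prefix-sum scan of the 200-point
-- window; objective: faster (constant factor ≈ window size).

-- ===== PORT A =====
-- the Python argument is a dict: the association list is read through PySem.Dict.ofList
def findMaxTime (data : List (Int × List Int)) : Int :=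
  let d := PySem.Dict.ofList data
  ((PySem.List.pyRange 200 400 1).foldl (fun (st : Int × Int) time =>
      let procCounter := d.keys.foldl (fun (c : Int) processId =>
        let vals := d.getD processId []
        -- data[processId][0]/[1]: exact under Pre_ (each dict value has length ≥ 2)
        let start := PySem.List.pyGetD vals 0 0
        let stop  := PySem.List.pyGetD vals 1 0
        if (start ≤ time ∧ time ≤ stop) ∧ processId ≠ 8 then c + 1 else c) 0
      if procCounter = 4 then (st.1, st.2 + 1) else (max st.1 st.2, 0)) ((0:Int), (0:Int))).1

-- ===== PORT B =====
-- diff[i] += x  (index is in range whenever B executes it: 200 ≤ lo ≤ hi ≤ 399)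
def pvBump (dl : List Int) (i : Nat) (x : Int) : List Int := dl.set i (dl.getD i 0 + x)

def findMaxTime_alt (data : List (Int × List Int)) : Int :=
  let d := PySem.Dict.ofList data
  let diff := d.items.foldl (fun (dl : List Int) p =>
      if p.1 = 8 then dl
      else
        let start := PySem.List.pyGetD p.2 0 0
        let stop  := PySem.List.pyGetD p.2 1 0
        let lo := max start 200
        let hi := min stop 399
        -- lo - 200 and hi - 199 are the Python indices, nonnegative when lo ≤ hi
        if lo ≤ hi then pvBump (pvBump dl (lo - 200).toNat 1) (hi - 199).toNat (-1) else dl)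
    (List.replicate 201 0)
  ((List.range 200).foldl (fun (st : Int × Int × Int) i =>
      let count := st.2.2 + diff.getD i 0
      if count = 4 then (st.1, st.2.1 + 1, count)
      else (max st.1 st.2.1, (0:Int), count)) ((0:Int), (0:Int), (0:Int))).1

-- ===== PRECONDITION & SPEC =====
-- Pre_ excludes exactly the inputs on which A raises IndexError: a value of the dict
-- (after Python's duplicate-key overwrite, hence Dict.ofList) with fewer than 2 elements.
def Pre_findMaxTime (data : List (Int × List Int)) : Prop :=
  ∀ p ∈ (PySem.Dict.ofList data).items, 2 ≤ p.2.length
instance (data : List (Int × List Int)) : Decidable (Pre_findMaxTime data) := by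
  unfold Pre_findMaxTime; infer_instance

def pvWitness_findMaxTime : (List (Int × List Int)) := [(1, [210, 250]), (2, [0, 500])]

def Spec_findMaxTime (data : List (Int × List Int)) (out : Int) : Prop := out = findMaxTime_alt data
instance (data : List (Int × List Int)) (out : Int) : Decidable (Spec_findMaxTime data out) := by unfold Spec_findMaxTime; infer_instance

-- ===== CLAIM (what is proved, stated in full; the proofs are below) =====
def Claim_equal_findMaxTime : Prop := ∀ (data : List (Int × List Int)), Dom_findMaxTime data → Pre_findMaxTime data → Spec_findMaxTime data (findMaxTime data)

-- ===== LEMMAS AND PROOFS =====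

-- the number of processes (other than 8) active at time t, over an items list
def pvCnt (l : List (Int × List Int)) (t : Int) : Int :=
  (l.countP (fun p => decide ((PySem.List.pyGetD p.2 0 0 ≤ t ∧ t ≤ PySem.List.pyGetD p.2 1 0) ∧ p.1 ≠ 8)) : Int)

-- B's per-entry update of the difference array, as a named function
def pvStep (dl : List Int) (p : Int × List Int) : List Int :=
  if p.1 = 8 then dl
  else
    let start := PySem.List.pyGetD p.2 0 0
    let stop  := PySem.List.pyGetD p.2 1 0
    let lo := max start 200
    let hi := min stop 399
    if lo ≤ hi then pvBump (pvBump dl (lo - 200).toNat 1) (hi - 199).toNat (-1) else dl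

lemma pvStep_length (dl : List Int) (p : Int × List Int) : (pvStep dl p).length = dl.length := by
  rw [pvStep]
  split
  · rfl
  · dsimp only
    split
    · simp [pvBump]
    · rfl

lemma pvFoldl_length (l : List (Int × List Int)) (dl : List Int) :
    (l.foldl pvStep dl).length = dl.length := by
  induction l generalizing dl with
  | nil => rfl
  | cons p l ih => simp [List.foldl_cons, ih, pvStep_length]

lemma sum_take_bump (dl : List Int) (i : Nat) (x : Int) (k : Nat) (hi : i < dl.length) :
    ((pvBump dl i x).take k).sum = (dl.take k).sum + if i < k then x else 0 := by
  unfold pvBump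
  induction dl generalizing i k with
  | nil => simp at hi
  | cons a dl ih =>
    cases i with
    | zero =>
      cases k with
      | zero => simp
      | succ k => simp [List.getD]; ring
    | succ i =>
      cases k with
      | zero => simp
      | succ k =>
        simp only [List.set_cons_succ, List.take_succ_cons, List.sum_cons, List.getD_cons_succ]
        rw [ih i k (by simpa using hi)]
        simp
        split_ifs <;> ring

-- prefix sums of the difference array count the active processes:
-- for 1 ≤ k ≤ 200, the sum of the first k diff entries is the count at time 199 + k
lemma pvDiffSum (l : List (Int × List Int)) (dl : List Int) (hlen : dl.length = 201)
    (k : Nat) (hk1 : 1 ≤ k) (hk2 : k ≤ 200) :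
    ((l.foldl pvStep dl).take k).sum = (dl.take k).sum + pvCnt l (199 + (k : Int)) := by
  induction l generalizing dl with
  | nil => simp [pvCnt]
  | cons p l ih =>
    simp only [List.foldl_cons]
    rw [ih (pvStep dl p) (by rw [pvStep_length]; exact hlen)]
    have hcnt : pvCnt (p :: l) (199 + (k : Int)) =
        pvCnt l (199 + (k : Int)) +
        (if (PySem.List.pyGetD p.2 0 0 ≤ 199 + (k : Int) ∧ 199 + (k : Int) ≤ PySem.List.pyGetD p.2 1 0) ∧ p.1 ≠ 8 then 1 else 0) := by
      unfold pvCnt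
      by_cases h : (PySem.List.pyGetD p.2 0 0 ≤ 199 + (k : Int) ∧ 199 + (k : Int) ≤ PySem.List.pyGetD p.2 1 0) ∧ p.1 ≠ 8 <;> simp [h]
    rw [hcnt]
    have hstep : ((pvStep dl p).take k).sum = (dl.take k).sum +
        (if (PySem.List.pyGetD p.2 0 0 ≤ 199 + (k : Int) ∧ 199 + (k : Int) ≤ PySem.List.pyGetD p.2 1 0) ∧ p.1 ≠ 8 then 1 else 0) := by
      unfold pvStep
      set start := PySem.List.pyGetD p.2 0 0 with hs
      set stop := PySem.List.pyGetD p.2 1 0 with ht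
      by_cases h8 : p.1 = 8
      · simp [h8]
      · simp only [h8, if_false]
        by_cases hlohi : max start 200 ≤ min stop 399
        · simp only [hlohi, if_true]
          have hlo : (200 : Int) ≤ max start 200 := le_max_right _ _
          have hhi : min stop 399 ≤ 399 := min_le_right _ _
          have ha : (max start 200 - 200).toNat < dl.length := by rw [hlen]; omega
          have hb : (min stop 399 - 199).toNat <
              (pvBump dl (max start 200 - 200).toNat 1).length := by
            simp only [pvBump, List.length_set]; rw [hlen]; omega
          rw [sum_take_bump _ _ _ _ hb, sum_take_bump _ _ _ _ ha]
          by_cases hact : max start 200 ≤ 199 + (k:Int) ∧ 199 + (k:Int) ≤ min stop 399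
          · have hc : (start ≤ 199 + (k:Int) ∧ 199 + (k:Int) ≤ stop) ∧ ¬p.1 = 8 :=
              ⟨⟨by omega, by omega⟩, h8⟩
            have h1 : (max start 200 - 200).toNat < k := by omega
            have h2 : ¬ (min stop 399 - 199).toNat < k := by omega
            rw [if_pos h1, if_neg h2, if_pos hc]; ring
          · have hc : ¬ ((start ≤ 199 + (k:Int) ∧ 199 + (k:Int) ≤ stop) ∧ ¬p.1 = 8) := by
              rintro ⟨⟨h1, h2⟩, _⟩
              rcases not_and_or.mp hact with h | h <;> omega
            rw [if_neg hc]
            by_cases h1 : (max start 200 - 200).toNat < k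
            · have h2 : (min stop 399 - 199).toNat < k := by omega
              rw [if_pos h1, if_pos h2]; ring
            · have h2 : ¬ (min stop 399 - 199).toNat < k := by omega
              rw [if_neg h1, if_neg h2]; ring
        · simp only [hlohi, if_false]
          have hc : ¬ ((start ≤ 199 + (k:Int) ∧ 199 + (k:Int) ≤ stop) ∧ ¬p.1 = 8) := by
            rintro ⟨⟨h1, h2⟩, _⟩; omega
          simp [hc]
    rw [hstep]; ring

-- the scan over the diff prefix sums equals the scan over the counts
lemma pvScan (g : Nat → Int) (diff : List Int) (hlen : diff.length = 201)
    (hg : ∀ j, j < 200 → (diff.take (j+1)).sum = g j) :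
    ∀ (n s : Nat) (m c cv : Int), s + n = 200 → cv = (diff.take s).sum →
      ((List.range' s n).foldl (fun (st : Int × Int × Int) i =>
          let count := st.2.2 + diff.getD i 0
          if count = 4 then (st.1, st.2.1 + 1, count)
          else (max st.1 st.2.1, (0:Int), count)) (m, c, cv)).1 =
      ((List.range' s n).foldl (fun (st : Int × Int) j =>
          if g j = 4 then (st.1, st.2 + 1) else (max st.1 st.2, 0)) (m, c)).1 := by
  intro n
  induction n with
  | zero => intro s m c cv h hcv; rfl
  | succ n ih =>
    intro s m c cv h hcv
    rw [List.range'_succ]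
    simp only [List.foldl_cons]
    have hs : s < 200 := by omega
    have hslen : s < diff.length := by omega
    have hsum : (diff.take (s+1)).sum = (diff.take s).sum + diff.getD s 0 := by
      rw [List.take_add_one, List.getElem?_eq_getElem hslen]
      simp only [Option.toList_some, List.sum_append, List.sum_cons, List.sum_nil, add_zero]
      rw [List.getD_eq_getElem diff 0 hslen]
    have hc : cv + diff.getD s 0 = g s := by rw [hcv, ← hsum, hg s hs]
    rw [hc]
    split_ifs with h4
    · exact ih (s+1) m (c+1) (g s) (by omega) (by rw [← hg s hs])
    · exact ih (s+1) (max m c) 0 (g s) (by omega) (by rw [← hg s hs])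

-- A's inner loop over the keys is the count over the items
lemma pvInner (d : PySem.Dict Int (List Int)) (hnd : d.keys.Nodup) (t : Int) :
    d.keys.foldl (fun (c : Int) processId =>
      if (PySem.List.pyGetD (d.getD processId []) 0 0 ≤ t ∧
          t ≤ PySem.List.pyGetD (d.getD processId []) 1 0) ∧ processId ≠ 8 then c + 1 else c) 0
      = pvCnt d.items t := by
  have hkeys : d.keys = d.items.map Prod.fst := rfl
  rw [hkeys, List.foldl_map]
  refine Eq.trans (PySem.List.foldl_congr_mem _ _
    (fun (c : Int) (p : Int × List Int) =>
      if (PySem.List.pyGetD p.2 0 0 ≤ t ∧ t ≤ PySem.List.pyGetD p.2 1 0) ∧ p.1 ≠ 8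
      then c + 1 else c) _ ?_) ?_
  · intro acc p hp
    rw [PySem.Dict.getD_of_mem_items d hp hnd]
  · rw [PySem.List.foldl_ite_add_one]
    simp [pvCnt]

-- the two sides, reduced to one common scan
lemma pvAEq (data : List (Int × List Int)) :
    findMaxTime data =
      ((List.range' 0 200).foldl (fun (st : Int × Int) (j : Nat) =>
        if pvCnt (PySem.Dict.ofList data).items (200 + (j : Int)) = 4
        then (st.1, st.2 + 1) else (max st.1 st.2, 0)) ((0:Int), (0:Int))).1 := by
  unfold findMaxTime
  dsimp only
  rw [PySem.List.pyRange_one, show ((400:Int) - 200).toNat = 200 from rfl]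
  rw [List.foldl_map]
  simp only [pvInner (PySem.Dict.ofList data) (PySem.Dict.nodup_keys_ofList data)]
  rw [List.range_eq_range']

set_option maxRecDepth 8192 in
set_option maxHeartbeats 1000000 in
lemma pvBEq (data : List (Int × List Int)) :
    findMaxTime_alt data =
      ((List.range' 0 200).foldl (fun (st : Int × Int) (j : Nat) =>
        if pvCnt (PySem.Dict.ofList data).items (200 + (j : Int)) = 4
        then (st.1, st.2 + 1) else (max st.1 st.2, 0)) ((0:Int), (0:Int))).1 := by
  unfold findMaxTime_alt
  dsimp only
  rw [show (fun (dl : List Int) (p : Int × List Int) =>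
      if p.1 = 8 then dl
      else
        let start := PySem.List.pyGetD p.2 0 0
        let stop  := PySem.List.pyGetD p.2 1 0
        let lo := max start 200
        let hi := min stop 399
        if lo ≤ hi then pvBump (pvBump dl (lo - 200).toNat 1) (hi - 199).toNat (-1) else dl)
      = pvStep from rfl]
  rw [List.range_eq_range']
  exact pvScan (fun j => pvCnt (PySem.Dict.ofList data).items (200 + (j : Int)))
    ((PySem.Dict.ofList data).items.foldl pvStep (List.replicate 201 0))
    (by rw [pvFoldl_length]; simp)
    (by
      intro j hj
      have h := pvDiffSum (PySem.Dict.ofList data).items (List.replicate 201 0)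
        (by simp) (j+1) (by omega) (by omega)
      rw [h]
      simp only [List.take_replicate, List.sum_replicate, smul_zero, zero_add]
      congr 1
      push_cast
      ring)
    200 0 0 0 0 rfl rfl

-- ===== VERDICT (by name: the statement is the Claim_ definition above) =====
theorem findMaxTime_spec : Claim_equal_findMaxTime := by
  intro data _hdom _hpre
  unfold Spec_findMaxTime
  rw [pvAEq, pvBEq]
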